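-- pv_equiv track=rewrite | github.com/filakrad/adventOfCode | y2023/day22/code.py | brick_fall
-- ===== SOURCE A (Python) =====
-- def brick_fall(data):
--     min_x = min(min(x[0][0], x[1][0]) for x in data)
--     max_x = max(max(x[0][0], x[1][0]) for x in data)
--     min_y = min(min(x[0][1], x[1][1]) for x in data)
--     max_y = max(max(x[0][1], x[1][1]) for x in data)
--     field_height = [[0 for _ in range(min_x, max_x+1)] for _ in range(min_y, max_y+1)]
--     field_label = [[-1 for _ in range(min_x, max_x+1)] for _ in range(min_y, max_y+1)]
--     supports = {i: set() for i in range(-1, len(data))}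
--     supported_by = {i: set() for i in range(-1, len(data))}
--     for i, brick in enumerate(data):
--         brick_height = brick[1][2] - brick[0][2] + 1
--         brick_coords = []
--         for p in range(brick[0][0], brick[1][0] + 1):
--             for q in range(brick[0][1], brick[1][1] + 1):
--                 brick_coords.append((p, q))
--         top = max(field_height[q][p] for p, q in brick_coords)
--         for p, q in brick_coords:
--             if field_height[q][p] == top:
--                 supports[field_label[q][p]].add(i)
--                 supported_by[i].add(field_label[q][p])
--             field_height[q][p] = top + brick_height
--             field_label[q][p] = i
--     return supports, supported_by
-- ===== SOURCE B (Python) =====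
-- def brick_fall(data):
--     supports = {i: set() for i in range(-1, len(data))}
--     supported_by = {i: set() for i in range(-1, len(data))}
--     rest = []  # settled top height of each processed brick, in input order
--     for i, ((x0, y0, z0), (x1, y1, z1)) in enumerate(data):
--         # resting surface under each footprint cell: found by scanning EARLIER
--         # bricks back-to-front for the last one whose footprint covers the cell
--         def below(p, q):
--             for j in range(i - 1, -1, -1):
--                 (a0, b0, _), (a1, b1, _) = data[j]
--                 if a0 <= p <= a1 and b0 <= q <= b1:
--                     return rest[j], j
--             return 0, -1
--         cells = [below(p, q) for p in range(x0, x1 + 1) for q in range(y0, y1 + 1)]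
--         top = max(v for v, _ in cells)
--         for v, lab in cells:
--             if v == top:
--                 supports[lab].add(i)
--                 supported_by[i].add(lab)
--         rest.append(top + (z1 - z0 + 1))
--     return supports, supported_by
-- ===== Notes on version B (the rewrite author's own statement) =====
-- stated objective: alternative
-- what changed: B keeps no 2D field at all: instead of A's forward simulation that mutates dense height/label grids, B keeps only a list `rest` of each brick's settled top and, for every footprint cell of each brick, finds the supporting surface by scanning the EARLIER bricks back-to-front for the last one covering that cell (a purely functional lookback recurrence); supports are then read off the per-cell (height,label) list.
import Mathlib
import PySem

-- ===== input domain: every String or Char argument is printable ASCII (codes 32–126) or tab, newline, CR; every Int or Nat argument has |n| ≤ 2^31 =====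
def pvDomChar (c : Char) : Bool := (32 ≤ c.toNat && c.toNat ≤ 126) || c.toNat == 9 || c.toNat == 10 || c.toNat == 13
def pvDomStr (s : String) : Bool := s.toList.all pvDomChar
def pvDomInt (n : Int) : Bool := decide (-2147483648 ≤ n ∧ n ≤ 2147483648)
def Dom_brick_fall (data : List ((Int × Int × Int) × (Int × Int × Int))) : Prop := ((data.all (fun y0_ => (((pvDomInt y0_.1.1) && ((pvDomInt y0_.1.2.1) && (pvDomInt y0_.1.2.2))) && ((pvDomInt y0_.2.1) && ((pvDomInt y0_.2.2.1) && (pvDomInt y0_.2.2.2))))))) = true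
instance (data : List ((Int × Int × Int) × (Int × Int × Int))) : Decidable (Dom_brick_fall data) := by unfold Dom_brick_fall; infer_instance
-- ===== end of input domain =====

-- B keeps no 2D field: instead of A's forward simulation on dense height/label grids, B records each
-- brick's settled top in a list and finds every footprint cell's support by a back-to-front lookback
-- over the earlier bricks. Return value only; neither version mutates its argument.

abbrev Brick := (Int × Int × Int) × (Int × Int × Int)

-- ===== PORT A =====
def gMinX (data : List Brick) : Int := (PySem.List.min? (data.map (fun x => min x.1.1 x.2.1)) (fun v => v)).getD 0
def gMaxX (data : List Brick) : Int := (PySem.List.max? (data.map (fun x => max x.1.1 x.2.1)) (fun v => v)).getD 0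
def gMinY (data : List Brick) : Int := (PySem.List.min? (data.map (fun x => min x.1.2.1 x.2.2.1)) (fun v => v)).getD 0
def gMaxY (data : List Brick) : Int := (PySem.List.max? (data.map (fun x => max x.1.2.1 x.2.2.1)) (fun v => v)).getD 0

-- field[q][p] — Python chained indexing; negative indices wrap, exactly as pyGetD/pySetD do.
-- The defaults ([], 0, -1) are only reached where Python would raise IndexError; Pre_ excludes that.
def readC (g : List (List Int)) (q p : Int) (d : Int) : Int :=
  PySem.List.pyGetD (PySem.List.pyGetD g q []) p d
def writeC (g : List (List Int)) (q p : Int) (v : Int) : List (List Int) :=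
  PySem.List.pySetD g q (PySem.List.pySetD (PySem.List.pyGetD g q []) p v)

structure ASt where
  gh : List (List Int)
  gl : List (List Int)
  sup : PySem.Dict Int (PySem.Set Int)
  supby : PySem.Dict Int (PySem.Set Int)

def brickCells (b : Brick) : List (Int × Int) :=
  (PySem.List.pyRange b.1.1 (b.2.1 + 1) 1).foldl (fun acc p =>
    (PySem.List.pyRange b.1.2.1 (b.2.2.1 + 1) 1).foldl (fun acc q => acc ++ [(p, q)]) acc) []

def stepA (ib : Int × Brick) (st : ASt) : ASt :=
  let i := ib.1
  let b := ib.2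
  let bh := b.2.2.2 - b.1.2.2 + 1
  let coords := brickCells b
  let top : Int := (PySem.List.max? (coords.map (fun c => readC st.gh c.2 c.1 0)) (fun v => v)).getD 0
  coords.foldl (fun st c =>
    let st' :=
      if readC st.gh c.2 c.1 0 = top then
        { st with
          sup := st.sup.modify (readC st.gl c.2 c.1 (-1)) PySem.Set.empty (fun s => PySem.Set.add s i),
          supby := st.supby.modify i PySem.Set.empty (fun s => PySem.Set.add s (readC st.gl c.2 c.1 (-1))) }
      else st
    { st' with gh := writeC st'.gh c.2 c.1 (top + bh), gl := writeC st'.gl c.2 c.1 i }) st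

def supInit (n : Int) : PySem.Dict Int (PySem.Set Int) :=
  (PySem.List.pyRange (-1) n 1).foldl (fun d k => d.insert k PySem.Set.empty) PySem.Dict.empty

def brick_fall (data : List ((Int × Int × Int) × (Int × Int × Int))) : (List (Int × List Int)) × (List (Int × List Int)) :=
  let gh0 := (PySem.List.pyRange (gMinY data) (gMaxY data + 1) 1).map (fun _ =>
    (PySem.List.pyRange (gMinX data) (gMaxX data + 1) 1).map (fun _ => (0 : Int)))
  let gl0 := (PySem.List.pyRange (gMinY data) (gMaxY data + 1) 1).map (fun _ =>
    (PySem.List.pyRange (gMinX data) (gMaxX data + 1) 1).map (fun _ => (-1 : Int)))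
  let st := (PySem.List.enumerate data 0).foldl (fun st ib => stepA ib st)
    ⟨gh0, gl0, supInit (data.length : Int), supInit (data.length : Int)⟩
  (st.sup.items, st.supby.items)

-- ===== PORT B =====
-- a0 <= p <= a1 and b0 <= q <= b1
def coverB (b : Brick) (p q : Int) : Bool :=
  decide (b.1.1 ≤ p ∧ p ≤ b.2.1 ∧ b.1.2.1 ≤ q ∧ q ≤ b.2.2.1)

-- `below(p, q)`: scan j = i-1, i-2, …, 0 and return (rest[j], j) at the first (= last-placed)
-- earlier brick covering the cell; (0, -1) = ground if none does.  The pyGetD defaults are never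
-- reached: 0 ≤ j < i ≤ len(data) = len(rest).
def belowB (data : List Brick) (rests : List Int) (i p q : Int) : Int × Int :=
  ((PySem.List.pyRange (i - 1) (-1) (-1)).findSome? (fun j =>
    if coverB (PySem.List.pyGetD data j ((0, 0, 0), (0, 0, 0))) p q
    then some (PySem.List.pyGetD rests j 0, j) else none)).getD (0, -1)

structure BSt where
  rests : List Int
  sup : PySem.Dict Int (PySem.Set Int)
  supby : PySem.Dict Int (PySem.Set Int)

def stepB (data : List Brick) (st : BSt) (ib : Int × Brick) : BSt :=
  let i := ib.1
  let x0 := ib.2.1.1; let y0 := ib.2.1.2.1; let z0 := ib.2.1.2.2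
  let x1 := ib.2.2.1; let y1 := ib.2.2.2.1; let z1 := ib.2.2.2.2
  let cells := (PySem.List.pyRange x0 (x1 + 1) 1).flatMap (fun p =>
    (PySem.List.pyRange y0 (y1 + 1) 1).map (fun q => belowB data st.rests i p q))
  let top : Int := (PySem.List.max? (cells.map (fun vl => vl.1)) (fun v => v)).getD 0   -- max() raises on an empty footprint; Pre_ excludes that
  let rec' := cells.foldl (fun d vl =>
    if vl.1 = top then
      (d.1.modify vl.2 PySem.Set.empty (fun s => PySem.Set.add s i),
       d.2.modify i PySem.Set.empty (fun s => PySem.Set.add s vl.2))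
    else d) (st.sup, st.supby)
  { rests := st.rests ++ [top + (z1 - z0 + 1)], sup := rec'.1, supby := rec'.2 }

def brick_fall_alt (data : List ((Int × Int × Int) × (Int × Int × Int))) : (List (Int × List Int)) × (List (Int × List Int)) :=
  let st := (PySem.List.enumerate data 0).foldl (fun st ib => stepB data st ib)
    ⟨[], supInit (data.length : Int), supInit (data.length : Int)⟩
  (st.sup.items, st.supby.items)

-- ===== PRECONDITION & SPEC =====
-- Pre_ is exactly where the Python A returns: a nonempty list, each brick's x/y ranges non-inverted
-- (an inverted range makes A's `max()` raise ValueError on an empty sequence), and the global x/y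
-- minima ≤ 0 with maxima ≥ -1 (otherwise some footprint index falls outside A's grids → IndexError).
def Pre_brick_fall (data : List ((Int × Int × Int) × (Int × Int × Int))) : Prop :=
  data ≠ [] ∧ (∀ b ∈ data, b.1.1 ≤ b.2.1 ∧ b.1.2.1 ≤ b.2.2.1) ∧
  gMinX data ≤ 0 ∧ -1 ≤ gMaxX data ∧ gMinY data ≤ 0 ∧ -1 ≤ gMaxY data
instance (data : List ((Int × Int × Int) × (Int × Int × Int))) : Decidable (Pre_brick_fall data) := by
  unfold Pre_brick_fall; infer_instance

def pvWitness_brick_fall : (List ((Int × Int × Int) × (Int × Int × Int))) :=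
  [((0, 0, 1), (1, 0, 1)), ((0, 0, 2), (0, 1, 3))]

def Spec_brick_fall (data : List ((Int × Int × Int) × (Int × Int × Int))) (out : (List (Int × List Int)) × (List (Int × List Int))) : Prop := out = brick_fall_alt data
instance (data : List ((Int × Int × Int) × (Int × Int × Int))) (out : (List (Int × List Int)) × (List (Int × List Int))) : Decidable (Spec_brick_fall data out) := by unfold Spec_brick_fall; infer_instance

-- ===== CLAIM (what is proved, stated in full; the proofs are below) =====
def Claim_equal_brick_fall : Prop := ∀ (data : List ((Int × Int × Int) × (Int × Int × Int))), Dom_brick_fall data → Pre_brick_fall data → Spec_brick_fall data (brick_fall data)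

-- ===== LEMMAS AND PROOFS =====

-- ---- bounds from the global minima/maxima ----
theorem gMinX_le {data : List Brick} {b : Brick} (hb : b ∈ data) : gMinX data ≤ min b.1.1 b.2.1 := by
  unfold gMinX
  have hm : min b.1.1 b.2.1 ∈ data.map (fun x => min x.1.1 x.2.1) := List.mem_map_of_mem hb
  cases h : PySem.List.min? (data.map (fun x => min x.1.1 x.2.1)) (fun v => v) with
  | none => exact absurd ((PySem.List.min?_eq_none_iff _ _).mp h ▸ hm) (List.not_mem_nil)
  | some m => simpa using PySem.List.min?_isMin h _ hm

theorem le_gMaxX {data : List Brick} {b : Brick} (hb : b ∈ data) : max b.1.1 b.2.1 ≤ gMaxX data := by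
  unfold gMaxX
  have hm : max b.1.1 b.2.1 ∈ data.map (fun x => max x.1.1 x.2.1) := List.mem_map_of_mem hb
  cases h : PySem.List.max? (data.map (fun x => max x.1.1 x.2.1)) (fun v => v) with
  | none => exact absurd ((PySem.List.max?_eq_none_iff _ _).mp h ▸ hm) (List.not_mem_nil)
  | some m => simpa using PySem.List.max?_isMax h _ hm

theorem gMinY_le {data : List Brick} {b : Brick} (hb : b ∈ data) : gMinY data ≤ min b.1.2.1 b.2.2.1 := by
  unfold gMinY
  have hm : min b.1.2.1 b.2.2.1 ∈ data.map (fun x => min x.1.2.1 x.2.2.1) := List.mem_map_of_mem hb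
  cases h : PySem.List.min? (data.map (fun x => min x.1.2.1 x.2.2.1)) (fun v => v) with
  | none => exact absurd ((PySem.List.min?_eq_none_iff _ _).mp h ▸ hm) (List.not_mem_nil)
  | some m => simpa using PySem.List.min?_isMin h _ hm

theorem le_gMaxY {data : List Brick} {b : Brick} (hb : b ∈ data) : max b.1.2.1 b.2.2.1 ≤ gMaxY data := by
  unfold gMaxY
  have hm : max b.1.2.1 b.2.2.1 ∈ data.map (fun x => max x.1.2.1 x.2.2.1) := List.mem_map_of_mem hb
  cases h : PySem.List.max? (data.map (fun x => max x.1.2.1 x.2.2.1)) (fun v => v) with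
  | none => exact absurd ((PySem.List.max?_eq_none_iff _ _).mp h ▸ hm) (List.not_mem_nil)
  | some m => simpa using PySem.List.max?_isMax h _ hm

-- ---- Python index normalisation ----
def idx (n : Nat) (i : Int) : Nat := if 0 ≤ i then i.toNat else n - (-i).toNat

theorem pyIdx?_eq_idx {n : Nat} {i : Int} (h1 : -(n : Int) ≤ i) (h2 : i < (n : Int)) :
    PySem.List.pyIdx? n i = some (idx n i) := by
  simp only [PySem.List.pyIdx?, idx]; split_ifs <;> first | rfl | omega

theorem idx_lt {lo hi : Int} {n : Nat} (hn : n = (hi + 1 - lo).toNat)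
    (hlo : lo ≤ 0) (_hhi : -1 ≤ hi) {i : Int} (h1 : lo ≤ i) (h2 : i ≤ hi) : idx n i < n := by
  simp only [idx]; split_ifs <;> omega

theorem idx_inj {lo hi : Int} {n : Nat} (hn : n = (hi + 1 - lo).toNat)
    (_hlo : lo ≤ 0) (hhi : -1 ≤ hi) {i j : Int} (h1 : lo ≤ i) (h2 : i ≤ hi)
    (h3 : lo ≤ j) (h4 : j ≤ hi) (h : idx n i = idx n j) : i = j := by
  simp only [idx] at h; split_ifs at h <;> omega

theorem pyGetD_idx {α : Type} {xs : List α} {i : Int} {d : α}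
    (h1 : -(xs.length : Int) ≤ i) (h2 : i < (xs.length : Int)) :
    PySem.List.pyGetD xs i d = (xs[idx xs.length i]?).getD d := by
  simp [PySem.List.pyGetD, PySem.List.pyGet?, pyIdx?_eq_idx h1 h2]

theorem pySetD_idx {α : Type} {xs : List α} {i : Int} {v : α}
    (h1 : -(xs.length : Int) ≤ i) (h2 : i < (xs.length : Int)) :
    PySem.List.pySetD xs i v = xs.set (idx xs.length i) v := by
  simp [PySem.List.pySetD, PySem.List.pySet?, pyIdx?_eq_idx h1 h2]

-- ---- grid dimensions ----
def Dims (g : List (List Int)) (Hh Ww : Nat) : Prop :=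
  g.length = Hh ∧ ∀ row ∈ g, row.length = Ww

theorem pyIdx?_some_lt {n : Nat} {i : Int} {k : Nat} (h : PySem.List.pyIdx? n i = some k) : k < n := by
  simp only [PySem.List.pyIdx?] at h; split_ifs at h <;> simp at h <;> omega

theorem writeC_eq {g : List (List Int)} {q : Int} {k : Nat}
    (hk : PySem.List.pyIdx? g.length q = some k) (p : Int) (v : Int) :
    writeC g q p v = g.set k (PySem.List.pySetD ((g[k]?).getD []) p v) := by
  simp [writeC, PySem.List.pySetD, PySem.List.pySet?, PySem.List.pyGetD, PySem.List.pyGet?, hk]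

theorem writeC_none {g : List (List Int)} {q : Int}
    (hk : PySem.List.pyIdx? g.length q = none) (p : Int) (v : Int) :
    writeC g q p v = g := by
  simp [writeC, PySem.List.pySetD, PySem.List.pySet?, hk]

theorem readC_eq {g : List (List Int)} {q : Int} {k : Nat}
    (hk : PySem.List.pyIdx? g.length q = some k) (p d : Int) :
    readC g q p d = PySem.List.pyGetD ((g[k]?).getD []) p d := by
  simp [readC, PySem.List.pyGetD, PySem.List.pyGet?, hk]

theorem dims_writeC {g : List (List Int)} {Hh Ww : Nat} (hg : Dims g Hh Ww)
    {q p v : Int} : Dims (writeC g q p v) Hh Ww := by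
  obtain ⟨hl, hr⟩ := hg
  cases hk : PySem.List.pyIdx? g.length q with
  | none => rw [writeC_none hk]; exact ⟨hl, hr⟩
  | some k =>
    rw [writeC_eq hk]
    have hklt : k < g.length := pyIdx?_some_lt hk
    refine ⟨by simpa using hl, ?_⟩
    intro row hrow
    rcases List.mem_or_eq_of_mem_set hrow with h' | h'
    · exact hr _ h'
    · subst h'
      rw [PySem.List.length_pySetD]
      rw [List.getElem?_eq_getElem hklt]
      exact hr _ (List.getElem_mem hklt)

theorem readC_writeC_same {mnx mxx mny mxy : Int} (hx0 : mnx ≤ 0) (hx1 : -1 ≤ mxx)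
    (hy0 : mny ≤ 0) (hy1 : -1 ≤ mxy)
    {g : List (List Int)} (hg : Dims g (mxy + 1 - mny).toNat (mxx + 1 - mnx).toNat)
    {q p v d : Int} (hq1 : mny ≤ q) (hq2 : q ≤ mxy) (hp1 : mnx ≤ p) (hp2 : p ≤ mxx) :
    readC (writeC g q p v) q p d = v := by
  obtain ⟨hl, hr⟩ := hg
  have hk : PySem.List.pyIdx? g.length q = some (idx g.length q) :=
    pyIdx?_eq_idx (by omega) (by omega)
  have hklt : idx g.length q < g.length := by
    rw [hl]; exact idx_lt rfl hy0 hy1 hq1 hq2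
  have hrowlen : (g[idx g.length q]'hklt).length = (mxx + 1 - mnx).toNat :=
    hr _ (List.getElem_mem hklt)
  have hplt : idx (g[idx g.length q]'hklt).length p < (g[idx g.length q]'hklt).length := by
    rw [hrowlen]; exact idx_lt rfl hx0 hx1 hp1 hp2
  have hset : PySem.List.pySetD (g[idx g.length q]'hklt) p v
      = (g[idx g.length q]'hklt).set (idx (g[idx g.length q]'hklt).length p) v :=
    pySetD_idx (by omega) (by omega)
  rw [writeC_eq hk, List.getElem?_eq_getElem hklt]
  simp only [Option.getD_some]
  have hk2 : PySem.List.pyIdx?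
      (g.set (idx g.length q) (PySem.List.pySetD (g[idx g.length q]'hklt) p v)).length q
      = some (idx g.length q) := by rw [List.length_set]; exact hk
  rw [readC_eq hk2, List.getElem?_set_self (by simpa using hklt)]
  simp only [Option.getD_some, hset]
  have : idx ((g[idx g.length q]'hklt).set (idx (g[idx g.length q]'hklt).length p) v).length p
      = idx (g[idx g.length q]'hklt).length p := by rw [List.length_set]
  rw [pyGetD_idx (by simp; omega) (by simp; omega), this, List.getElem?_set_self hplt]
  rfl

theorem readC_writeC_ne {mnx mxx mny mxy : Int} (hx0 : mnx ≤ 0) (hx1 : -1 ≤ mxx)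
    (hy0 : mny ≤ 0) (hy1 : -1 ≤ mxy)
    {g : List (List Int)} (hg : Dims g (mxy + 1 - mny).toNat (mxx + 1 - mnx).toNat)
    {q p v d q' p' : Int} (hq1 : mny ≤ q) (hq2 : q ≤ mxy) (hp1 : mnx ≤ p) (hp2 : p ≤ mxx)
    (hq1' : mny ≤ q') (hq2' : q' ≤ mxy) (hp1' : mnx ≤ p') (hp2' : p' ≤ mxx)
    (hne : (p', q') ≠ (p, q)) :
    readC (writeC g q p v) q' p' d = readC g q' p' d := by
  obtain ⟨hl, hr⟩ := hg
  have hk : PySem.List.pyIdx? g.length q = some (idx g.length q) :=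
    pyIdx?_eq_idx (by omega) (by omega)
  have hk' : PySem.List.pyIdx? g.length q' = some (idx g.length q') :=
    pyIdx?_eq_idx (by omega) (by omega)
  have hklt : idx g.length q < g.length := by
    rw [hl]; exact idx_lt rfl hy0 hy1 hq1 hq2
  have hklt' : idx g.length q' < g.length := by
    rw [hl]; exact idx_lt rfl hy0 hy1 hq1' hq2'
  rw [writeC_eq hk]
  have hk2 : PySem.List.pyIdx?
      (g.set (idx g.length q) (PySem.List.pySetD ((g[idx g.length q]?).getD []) p v)).length q'
      = some (idx g.length q') := by rw [List.length_set]; exact hk'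
  rw [readC_eq hk2, readC_eq hk']
  by_cases hqq : idx g.length q = idx g.length q'
  · -- same row: q' = q, so p' ≠ p
    have hq'q : q' = q := idx_inj (n := g.length) (by omega) hy0 hy1 hq1' hq2' hq1 hq2 hqq.symm
    subst hq'q
    have hpp : p' ≠ p := fun h => hne (by rw [h])
    rw [hqq, List.getElem?_set_self (by simpa using hklt'), List.getElem?_eq_getElem hklt']
    simp only [Option.getD_some]
    set row := g[idx g.length q']'hklt' with hrow
    have hrowlen : row.length = (mxx + 1 - mnx).toNat := hr _ (List.getElem_mem hklt')
    have hset : PySem.List.pySetD row p v = row.set (idx row.length p) v :=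
      pySetD_idx (by omega) (by omega)
    have hplt' : idx row.length p' < row.length := by
      rw [hrowlen]; exact idx_lt rfl hx0 hx1 hp1' hp2'
    have hidxne : idx row.length p ≠ idx row.length p' := by
      intro h
      exact hpp (idx_inj (n := row.length) (by omega) hx0 hx1 hp1 hp2 hp1' hp2' h).symm
    rw [hset]
    rw [pyGetD_idx (xs := row.set (idx row.length p) v) (by simp; omega) (by simp; omega),
        pyGetD_idx (xs := row) (by omega) (by omega)]
    rw [List.length_set, List.getElem?_set_ne hidxne]
  · rw [List.getElem?_set_ne hqq]

-- ---- footprint cell lists ----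
def cellsOf (x0 x1 y0 y1 : Int) : List (Int × Int) :=
  (PySem.List.pyRange x0 (x1 + 1) 1).flatMap (fun p => (PySem.List.pyRange y0 (y1 + 1) 1).map (fun q => (p, q)))

theorem flatMap_single_map {α β : Type} (f : α → β) : ∀ (l : List α), (l.flatMap (fun x => [f x])) = l.map f := by
  intro l; induction l with
  | nil => rfl
  | cons a t ih => simp [ih]

theorem brickCells_eq (b : Brick) : brickCells b = cellsOf b.1.1 b.2.1 b.1.2.1 b.2.2.1 := by
  unfold brickCells cellsOf
  simp only [PySem.List.foldl_append_eq_flatMap, List.nil_append, flatMap_single_map]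

theorem mem_cellsOf {x0 x1 y0 y1 : Int} {c : Int × Int} :
    c ∈ cellsOf x0 x1 y0 y1 ↔ (x0 ≤ c.1 ∧ c.1 ≤ x1) ∧ (y0 ≤ c.2 ∧ c.2 ≤ y1) := by
  obtain ⟨p, q⟩ := c
  simp only [cellsOf, List.mem_flatMap, List.mem_map, PySem.List.mem_pyRange_one, Prod.mk.injEq]
  constructor
  · rintro ⟨a, ⟨h1, h2⟩, b, ⟨h3, h4⟩, rfl, rfl⟩; omega
  · rintro ⟨⟨h1, h2⟩, h3, h4⟩; exact ⟨p, by omega, q, by omega, rfl, rfl⟩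

theorem nodup_cellsOf {x0 x1 y0 y1 : Int} : (cellsOf x0 x1 y0 y1).Nodup := by
  have : cellsOf x0 x1 y0 y1 = (PySem.List.pyRange x0 (x1 + 1) 1) ×ˢ (PySem.List.pyRange y0 (y1 + 1) 1) := rfl
  rw [this]
  exact List.Nodup.product (PySem.List.nodup_pyRange_one _ _) (PySem.List.nodup_pyRange_one _ _)

-- B's cell comprehension is the map of `below` over the same footprint list
theorem flatMap_map_eq_cells {γ : Type} (x0 x1 y0 y1 : Int) (f : Int → Int → γ) :
    (PySem.List.pyRange x0 (x1 + 1) 1).flatMap (fun p =>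
      (PySem.List.pyRange y0 (y1 + 1) 1).map (fun q => f p q))
    = (cellsOf x0 x1 y0 y1).map (fun c => f c.1 c.2) := by
  simp [cellsOf, List.map_flatMap, List.map_map, Function.comp_def]

-- ---- the lookback function characterised ----
theorem belowB_zero (data : List Brick) (rests : List Int) (p q : Int) :
    belowB data rests 0 p q = (0, -1) := by
  unfold belowB
  rw [PySem.List.pyRange_neg_one_eq_nil (by omega)]
  rfl

theorem belowB_succ (data : List Brick) (rests : List Int) (k : Nat) (p q : Int) :
    belowB data rests ((k : Int) + 1) p q =
      if coverB (PySem.List.pyGetD data (k : Int) ((0, 0, 0), (0, 0, 0))) p q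
      then (PySem.List.pyGetD rests (k : Int) 0, (k : Int))
      else belowB data rests (k : Int) p q := by
  unfold belowB
  have h1 : ((k : Int) + 1 - 1) = (k : Int) := by ring
  rw [h1, PySem.List.pyRange_neg_one_cons (by omega)]
  simp only [List.findSome?_cons]
  cases hcov : coverB (PySem.List.pyGetD data (k : Int) ((0, 0, 0), (0, 0, 0))) p q <;> simp

theorem findSome?_congr_mem {α β : Type} {f g : α → Option β} :
    ∀ {l : List α}, (∀ a ∈ l, f a = g a) → l.findSome? f = l.findSome? g := by
  intro l
  induction l with
  | nil => intro _; rfl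
  | cons a t ih =>
    intro h
    rw [List.findSome?_cons, List.findSome?_cons, h a (List.mem_cons_self ..),
      ih (fun x hx => h x (List.mem_cons_of_mem _ hx))]

theorem belowB_append (data : List Brick) (rests : List Int) (x : Int) {i : Int}
    (hi : i ≤ (rests.length : Int)) (p q : Int) :
    belowB data (rests ++ [x]) i p q = belowB data rests i p q := by
  unfold belowB
  congr 1
  apply findSome?_congr_mem
  intro j hj
  have hj' := (PySem.List.mem_pyRange_neg_one).mp hj
  have hgd : PySem.List.pyGetD (rests ++ [x]) j 0 = PySem.List.pyGetD rests j 0 := by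
    have h0 : (0 : Int) ≤ j := by omega
    rw [pyGetD_idx (xs := rests ++ [x]) (by simp; omega) (by simp; omega),
        pyGetD_idx (xs := rests) (by omega) (by omega)]
    simp only [idx, if_pos h0]
    rw [List.getElem?_append_left (by omega)]
  rw [hgd]

-- ---- B's record loop over the (value, label) pairs, componentwise ----
theorem foldl_pair_if {κ1 κ2 : Type} (T : Int) (f : κ1 → Int × Int → κ1) (g : κ2 → Int × Int → κ2) :
    ∀ (l : List (Int × Int)) (s : κ1 × κ2),
    l.foldl (fun d vl => if vl.1 = T then (f d.1 vl, g d.2 vl) else d) s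
    = ((l.filter (fun vl => vl.1 == T)).foldl f s.1,
       (l.filter (fun vl => vl.1 == T)).foldl g s.2) := by
  intro l
  induction l with
  | nil => intro s; rfl
  | cons a t ih =>
    intro s
    by_cases h : a.1 = T
    · have hb : (a.1 == T) = true := by simpa using h
      rw [List.foldl_cons, if_pos h, List.filter_cons, if_pos hb, List.foldl_cons, List.foldl_cons]
      exact ih (f s.1 a, g s.2 a)
    · have hb : ¬ ((a.1 == T) = true) := by simpa using h
      rw [List.foldl_cons, if_neg h, List.filter_cons, if_neg hb]
      exact ih s

-- ---- A's per-cell loop characterised against fixed per-cell values V, L ----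
theorem foldA_spec (mnx mxx mny mxy : Int) (hx0 : mnx ≤ 0) (hx1 : -1 ≤ mxx)
    (hy0 : mny ≤ 0) (hy1 : -1 ≤ mxy)
    (V L : Int × Int → Int) (i T bh : Int) :
    ∀ (cs : List (Int × Int)) (st : ASt),
    cs.Nodup →
    (∀ c ∈ cs, mnx ≤ c.1 ∧ c.1 ≤ mxx ∧ mny ≤ c.2 ∧ c.2 ≤ mxy) →
    Dims st.gh (mxy + 1 - mny).toNat (mxx + 1 - mnx).toNat →
    Dims st.gl (mxy + 1 - mny).toNat (mxx + 1 - mnx).toNat →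
    (∀ c ∈ cs, readC st.gh c.2 c.1 0 = V c ∧ readC st.gl c.2 c.1 (-1) = L c) →
    (let res := cs.foldl (fun st c =>
        let st' :=
          if readC st.gh c.2 c.1 0 = T then
            { st with
              sup := st.sup.modify (readC st.gl c.2 c.1 (-1)) PySem.Set.empty (fun s => PySem.Set.add s i),
              supby := st.supby.modify i PySem.Set.empty (fun s => PySem.Set.add s (readC st.gl c.2 c.1 (-1))) }
          else st
        { st' with gh := writeC st'.gh c.2 c.1 (T + bh), gl := writeC st'.gl c.2 c.1 i }) st
     res.sup = (cs.filter (fun c => V c == T)).foldl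
        (fun d c => d.modify (L c) PySem.Set.empty (fun s => PySem.Set.add s i)) st.sup ∧
     res.supby = (cs.filter (fun c => V c == T)).foldl
        (fun d c => d.modify i PySem.Set.empty (fun s => PySem.Set.add s (L c))) st.supby ∧
     Dims res.gh (mxy + 1 - mny).toNat (mxx + 1 - mnx).toNat ∧
     Dims res.gl (mxy + 1 - mny).toNat (mxx + 1 - mnx).toNat ∧
     ∀ p q : Int, mnx ≤ p → p ≤ mxx → mny ≤ q → q ≤ mxy →
       (readC res.gh q p 0 = if (p, q) ∈ cs then T + bh else readC st.gh q p 0) ∧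
       (readC res.gl q p (-1) = if (p, q) ∈ cs then i else readC st.gl q p (-1))) := by
  intro cs
  induction cs with
  | nil =>
    intro st _ _ hgh hgl _
    exact ⟨rfl, rfl, hgh, hgl, fun p q _ _ _ _ => ⟨by simp, by simp⟩⟩
  | cons c t ih =>
    intro st hnd hbnd hgh hgl hread
    have hcb := hbnd c (List.mem_cons_self ..)
    have hreadc := hread c (List.mem_cons_self ..)
    have hcnin : c ∉ t := (List.nodup_cons.mp hnd).1
    set st1 := (if readC st.gh c.2 c.1 0 = T then
        { st with
          sup := st.sup.modify (readC st.gl c.2 c.1 (-1)) PySem.Set.empty (fun s => PySem.Set.add s i),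
          supby := st.supby.modify i PySem.Set.empty (fun s => PySem.Set.add s (readC st.gl c.2 c.1 (-1))) }
      else st : ASt) with hst1
    have hst1gh : st1.gh = st.gh := by rw [hst1]; split <;> rfl
    have hst1gl : st1.gl = st.gl := by rw [hst1]; split <;> rfl
    set st2 := ({ st1 with gh := writeC st1.gh c.2 c.1 (T + bh), gl := writeC st1.gl c.2 c.1 i } : ASt) with hst2
    have hfold : (c :: t).foldl (fun st c =>
        let st' :=
          if readC st.gh c.2 c.1 0 = T then
            { st with
              sup := st.sup.modify (readC st.gl c.2 c.1 (-1)) PySem.Set.empty (fun s => PySem.Set.add s i),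
              supby := st.supby.modify i PySem.Set.empty (fun s => PySem.Set.add s (readC st.gl c.2 c.1 (-1))) }
          else st
        { st' with gh := writeC st'.gh c.2 c.1 (T + bh), gl := writeC st'.gl c.2 c.1 i }) st
      = t.foldl (fun st c =>
        let st' :=
          if readC st.gh c.2 c.1 0 = T then
            { st with
              sup := st.sup.modify (readC st.gl c.2 c.1 (-1)) PySem.Set.empty (fun s => PySem.Set.add s i),
              supby := st.supby.modify i PySem.Set.empty (fun s => PySem.Set.add s (readC st.gl c.2 c.1 (-1))) }
          else st
        { st' with gh := writeC st'.gh c.2 c.1 (T + bh), gl := writeC st'.gl c.2 c.1 i }) st2 := rfl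
    have hgh2 : Dims st2.gh (mxy + 1 - mny).toNat (mxx + 1 - mnx).toNat := by
      rw [hst2]; exact dims_writeC (hst1gh ▸ hgh)
    have hgl2 : Dims st2.gl (mxy + 1 - mny).toNat (mxx + 1 - mnx).toNat := by
      rw [hst2]; exact dims_writeC (hst1gl ▸ hgl)
    have hread2 : ∀ c' ∈ t, readC st2.gh c'.2 c'.1 0 = V c' ∧ readC st2.gl c'.2 c'.1 (-1) = L c' := by
      intro c' hc'
      have hcb' := hbnd c' (List.mem_cons_of_mem _ hc')
      have hne : (c'.1, c'.2) ≠ (c.1, c.2) := by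
        intro h
        apply hcnin
        have : c' = c := by
          cases c'; cases c; simpa using h
        rw [← this]; exact hc'
      constructor
      · rw [hst2]
        show readC (writeC st1.gh c.2 c.1 (T + bh)) c'.2 c'.1 0 = _
        rw [hst1gh, readC_writeC_ne hx0 hx1 hy0 hy1 hgh hcb.2.2.1 hcb.2.2.2 hcb.1 hcb.2.1
          hcb'.2.2.1 hcb'.2.2.2 hcb'.1 hcb'.2.1 hne]
        exact (hread c' (List.mem_cons_of_mem _ hc')).1
      · rw [hst2]
        show readC (writeC st1.gl c.2 c.1 i) c'.2 c'.1 (-1) = _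
        rw [hst1gl, readC_writeC_ne hx0 hx1 hy0 hy1 hgl hcb.2.2.1 hcb.2.2.2 hcb.1 hcb.2.1
          hcb'.2.2.1 hcb'.2.2.2 hcb'.1 hcb'.2.1 hne]
        exact (hread c' (List.mem_cons_of_mem _ hc')).2
    have IH := ih st2 (List.nodup_cons.mp hnd).2 (fun c' hc' => hbnd c' (List.mem_cons_of_mem _ hc'))
      hgh2 hgl2 hread2
    rw [hfold]
    obtain ⟨IHsup, IHsupby, IHgh, IHgl, IHread⟩ := IH
    have hcond : (V c == T) = decide (readC st.gh c.2 c.1 0 = T) := by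
      rw [hreadc.1]; by_cases h : V c = T <;> simp [h]
    refine ⟨?_, ?_, IHgh, IHgl, ?_⟩
    · rw [IHsup, List.filter_cons]
      by_cases hc : readC st.gh c.2 c.1 0 = T
      · have hsup1 : st2.sup = st.sup.modify (L c) PySem.Set.empty (fun s => PySem.Set.add s i) := by
          rw [hst2, hst1]
          simp only [if_pos hc, hreadc.2]
        simp only [hcond, hc, decide_true, if_pos, List.foldl_cons, hsup1]
      · have hsup1 : st2.sup = st.sup := by rw [hst2, hst1]; simp only [if_neg hc]
        simp only [hcond, hc, decide_false, Bool.false_eq_true, if_neg, hsup1,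
          not_false_eq_true]
    · rw [IHsupby, List.filter_cons]
      by_cases hc : readC st.gh c.2 c.1 0 = T
      · have hsup1 : st2.supby = st.supby.modify i PySem.Set.empty (fun s => PySem.Set.add s (L c)) := by
          rw [hst2, hst1]
          simp only [if_pos hc, hreadc.2]
        simp only [hcond, hc, decide_true, if_pos, List.foldl_cons, hsup1]
      · have hsup1 : st2.supby = st.supby := by rw [hst2, hst1]; simp only [if_neg hc]
        simp only [hcond, hc, decide_false, Bool.false_eq_true, if_neg, hsup1,
          not_false_eq_true]
    · intro p q hp1 hp2 hq1 hq2
      obtain ⟨IHr1, IHr2⟩ := IHread p q hp1 hp2 hq1 hq2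
      by_cases hmem : (p, q) ∈ t
      · rw [IHr1, IHr2]
        simp [hmem]
      · by_cases hceq : (p, q) = c
        · have hr1 : readC st2.gh q p 0 = T + bh := by
            rw [hst2]
            show readC (writeC st1.gh c.2 c.1 (T + bh)) q p 0 = _
            rw [hst1gh, ← hceq]
            exact readC_writeC_same hx0 hx1 hy0 hy1 hgh hq1 hq2 hp1 hp2
          have hr2 : readC st2.gl q p (-1) = i := by
            rw [hst2]
            show readC (writeC st1.gl c.2 c.1 i) q p (-1) = _
            rw [hst1gl, ← hceq]
            exact readC_writeC_same hx0 hx1 hy0 hy1 hgl hq1 hq2 hp1 hp2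
          rw [IHr1, IHr2, if_neg hmem, if_neg hmem, hr1, hr2]
          simp [hceq]
        · have hne : ((p, q) : Int × Int) ≠ (c.1, c.2) := by
            intro h; apply hceq; rw [h]
          have hr1 : readC st2.gh q p 0 = readC st.gh q p 0 := by
            rw [hst2]
            show readC (writeC st1.gh c.2 c.1 (T + bh)) q p 0 = _
            rw [hst1gh]
            exact readC_writeC_ne hx0 hx1 hy0 hy1 hgh hcb.2.2.1 hcb.2.2.2 hcb.1 hcb.2.1
              hq1 hq2 hp1 hp2 hne
          have hr2 : readC st2.gl q p (-1) = readC st.gl q p (-1) := by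
            rw [hst2]
            show readC (writeC st1.gl c.2 c.1 i) q p (-1) = _
            rw [hst1gl]
            exact readC_writeC_ne hx0 hx1 hy0 hy1 hgl hcb.2.2.1 hcb.2.2.2 hcb.1 hcb.2.1
              hq1 hq2 hp1 hp2 hne
          have hnotc : (p, q) ∉ (c :: t) := by
            intro h
            rcases List.mem_cons.mp h with h' | h'
            · exact hceq h'
            · exact hmem h'
          rw [IHr1, IHr2, if_neg hmem, if_neg hmem, hr1, hr2, if_neg hnotc, if_neg hnotc]
          exact ⟨rfl, rfl⟩

-- ---- one brick: A's step equals B's step and preserves the lookback invariant ----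
theorem step_eq (data : List Brick) (mnx mxx mny mxy : Int) (hx0 : mnx ≤ 0) (hx1 : -1 ≤ mxx)
    (hy0 : mny ≤ 0) (hy1 : -1 ≤ mxy) (k : Nat) (hk : k < data.length)
    (hb1 : mnx ≤ data[k].1.1) (hb2 : data[k].2.1 ≤ mxx) (hb3 : mny ≤ data[k].1.2.1) (hb4 : data[k].2.2.1 ≤ mxy)
    (st : ASt) (bst : BSt) (hlen : bst.rests.length = k)
    (hsup : st.sup = bst.sup) (hsupby : st.supby = bst.supby)
    (hgh : Dims st.gh (mxy + 1 - mny).toNat (mxx + 1 - mnx).toNat)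
    (hgl : Dims st.gl (mxy + 1 - mny).toNat (mxx + 1 - mnx).toNat)
    (hreads : ∀ p q : Int, mnx ≤ p → p ≤ mxx → mny ≤ q → q ≤ mxy →
      readC st.gh q p 0 = (belowB data bst.rests (k : Int) p q).1 ∧
      readC st.gl q p (-1) = (belowB data bst.rests (k : Int) p q).2) :
    (stepA ((k : Int), data[k]) st).sup = (stepB data bst ((k : Int), data[k])).sup ∧
    (stepA ((k : Int), data[k]) st).supby = (stepB data bst ((k : Int), data[k])).supby ∧
    (stepB data bst ((k : Int), data[k])).rests.length = k + 1 ∧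
    Dims (stepA ((k : Int), data[k]) st).gh (mxy + 1 - mny).toNat (mxx + 1 - mnx).toNat ∧
    Dims (stepA ((k : Int), data[k]) st).gl (mxy + 1 - mny).toNat (mxx + 1 - mnx).toNat ∧
    (∀ p q : Int, mnx ≤ p → p ≤ mxx → mny ≤ q → q ≤ mxy →
      readC (stepA ((k : Int), data[k]) st).gh q p 0
        = (belowB data (stepB data bst ((k : Int), data[k])).rests ((k : Int) + 1) p q).1 ∧
      readC (stepA ((k : Int), data[k]) st).gl q p (-1)
        = (belowB data (stepB data bst ((k : Int), data[k])).rests ((k : Int) + 1) p q).2) := by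
  set b := data[k] with hb
  set cs := cellsOf b.1.1 b.2.1 b.1.2.1 b.2.2.1 with hcs
  set F : Int × Int → Int × Int := fun c => belowB data bst.rests (k : Int) c.1 c.2 with hF
  have hbnd : ∀ c ∈ cs, mnx ≤ c.1 ∧ c.1 ≤ mxx ∧ mny ≤ c.2 ∧ c.2 ≤ mxy := by
    intro c hc
    have := mem_cellsOf.mp hc
    omega
  have hread : ∀ c ∈ cs, readC st.gh c.2 c.1 0 = (F c).1 ∧ readC st.gl c.2 c.1 (-1) = (F c).2 := by
    intro c hc
    have hbc := hbnd c hc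
    exact hreads c.1 c.2 hbc.1 hbc.2.1 hbc.2.2.1 hbc.2.2.2
  have hnodup : cs.Nodup := nodup_cellsOf
  have hmapeq : cs.map (fun c => readC st.gh c.2 c.1 0) = cs.map (fun c => (F c).1) :=
    List.map_congr_left (fun c hc => (hread c hc).1)
  -- B's cells list
  have hcells : (PySem.List.pyRange b.1.1 (b.2.1 + 1) 1).flatMap (fun p =>
      (PySem.List.pyRange b.1.2.1 (b.2.2.1 + 1) 1).map (fun q => belowB data bst.rests (k : Int) p q))
      = cs.map F := flatMap_map_eq_cells b.1.1 b.2.1 b.1.2.1 b.2.2.1 _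
  set T : Int := (PySem.List.max? ((cs.map F).map (fun vl => vl.1)) (fun v => v)).getD 0 with hT
  have hTA : (PySem.List.max? (cs.map (fun c => readC st.gh c.2 c.1 0)) (fun v => v)).getD 0 = T := by
    rw [hmapeq, hT, List.map_map]
    rfl
  set bh : Int := b.2.2.2 - b.1.2.2 + 1 with hbh
  -- A's step in the characterised form
  have hAeq : stepA ((k : Int), b) st = cs.foldl (fun st c =>
      let st' :=
        if readC st.gh c.2 c.1 0 = T then
          { st with
            sup := st.sup.modify (readC st.gl c.2 c.1 (-1)) PySem.Set.empty (fun s => PySem.Set.add s (k : Int)),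
            supby := st.supby.modify (k : Int) PySem.Set.empty (fun s => PySem.Set.add s (readC st.gl c.2 c.1 (-1))) }
        else st
      { st' with gh := writeC st'.gh c.2 c.1 (T + bh), gl := writeC st'.gl c.2 c.1 (k : Int) }) st := by
    simp only [stepA, brickCells_eq]
    rw [← hcs, hTA]
  have HA := foldA_spec mnx mxx mny mxy hx0 hx1 hy0 hy1 (fun c => (F c).1) (fun c => (F c).2)
    (k : Int) T bh cs st hnodup hbnd hgh hgl hread
  obtain ⟨hA1, hA2, hA3, hA4, hA5⟩ := HA
  -- B's step in closed form
  have hBeq : stepB data bst ((k : Int), b) = ⟨bst.rests ++ [T + bh],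
      (cs.filter (fun c => (F c).1 == T)).foldl
        (fun d c => d.modify ((F c).2) PySem.Set.empty (fun s => PySem.Set.add s (k : Int))) bst.sup,
      (cs.filter (fun c => (F c).1 == T)).foldl
        (fun d c => d.modify (k : Int) PySem.Set.empty (fun s => PySem.Set.add s ((F c).2))) bst.supby⟩ := by
    show (⟨bst.rests ++ [_], _, _⟩ : BSt) = _
    rw [BSt.mk.injEq]
    refine ⟨by rw [hcells], ?_⟩
    rw [hcells]
    rw [foldl_pair_if T
      (fun d vl => d.modify vl.2 PySem.Set.empty (fun s => PySem.Set.add s (k : Int)))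
      (fun d vl => d.modify (k : Int) PySem.Set.empty (fun s => PySem.Set.add s vl.2))
      (cs.map F) (bst.sup, bst.supby)]
    rw [List.filter_map, List.foldl_map, List.foldl_map]
    exact ⟨rfl, rfl⟩
  rw [hAeq, hBeq]
  refine ⟨by rw [hA1, hsup], by rw [hA2, hsupby], by simp [hlen], hA3, hA4, ?_⟩
  intro p q hp1 hp2 hq1 hq2
  obtain ⟨hr1, hr2⟩ := hA5 p q hp1 hp2 hq1 hq2
  have hbelow : belowB data (bst.rests ++ [T + bh]) ((k : Int) + 1) p q
      = if (p, q) ∈ cs then (T + bh, (k : Int)) else belowB data bst.rests (k : Int) p q := by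
    rw [belowB_succ]
    have hget : PySem.List.pyGetD data (k : Int) ((0, 0, 0), (0, 0, 0)) = b := by
      simp only [PySem.List.pyGetD_natCast]
      rw [List.getD_eq_getElem?_getD, List.getElem?_eq_getElem hk]
      rfl
    rw [hget]
    have hcov : coverB b p q = decide ((p, q) ∈ cs) := by
      rw [hcs]
      by_cases hm : (p, q) ∈ cellsOf b.1.1 b.2.1 b.1.2.1 b.2.2.1
      · have := mem_cellsOf.mp hm
        simp only [coverB, hm, decide_true]
        simp only [decide_eq_true_eq]
        omega
      · have := fun h => hm (mem_cellsOf.mpr h)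
        simp only [coverB, hm, decide_false]
        simp only [decide_eq_false_iff_not]
        intro h
        exact this (by omega)
    rw [hcov]
    by_cases hm : (p, q) ∈ cs
    · have hgetr : PySem.List.pyGetD (bst.rests ++ [T + bh]) (k : Int) 0 = T + bh := by
        simp only [PySem.List.pyGetD_natCast]
        rw [List.getD_eq_getElem?_getD, List.getElem?_append_right (by omega)]
        simp [hlen]
      simp [hm, hgetr]
    · simp only [hm, decide_false, Bool.false_eq_true, if_neg, not_false_eq_true]
      exact belowB_append data bst.rests (T + bh) (by omega) p q
  rw [hbelow]
  by_cases hm : (p, q) ∈ cs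
  · rw [hr1, hr2, if_pos hm, if_pos hm, if_pos hm]
    exact ⟨rfl, rfl⟩
  · rw [hr1, hr2, if_neg hm, if_neg hm, if_neg hm]
    exact hreads p q hp1 hp2 hq1 hq2

-- ---- the whole brick loop, by suffix induction with the lookback invariant ----
theorem main_fold (data : List Brick) (mnx mxx mny mxy : Int) (hx0 : mnx ≤ 0) (hx1 : -1 ≤ mxx)
    (hy0 : mny ≤ 0) (hy1 : -1 ≤ mxy)
    (hb : ∀ b ∈ data, b.1.1 ≤ b.2.1 ∧ b.1.2.1 ≤ b.2.2.1 ∧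
      mnx ≤ b.1.1 ∧ b.2.1 ≤ mxx ∧ mny ≤ b.1.2.1 ∧ b.2.2.1 ≤ mxy) :
    ∀ (n k : Nat) (st : ASt) (bst : BSt), data.length - k = n → bst.rests.length = k →
    st.sup = bst.sup → st.supby = bst.supby →
    Dims st.gh (mxy + 1 - mny).toNat (mxx + 1 - mnx).toNat →
    Dims st.gl (mxy + 1 - mny).toNat (mxx + 1 - mnx).toNat →
    (∀ p q : Int, mnx ≤ p → p ≤ mxx → mny ≤ q → q ≤ mxy →
      readC st.gh q p 0 = (belowB data bst.rests (k : Int) p q).1 ∧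
      readC st.gl q p (-1) = (belowB data bst.rests (k : Int) p q).2) →
    ((PySem.List.enumerate (data.drop k) (k : Int)).foldl (fun st ib => stepA ib st) st).sup
      = ((PySem.List.enumerate (data.drop k) (k : Int)).foldl (fun bst ib => stepB data bst ib) bst).sup
    ∧ ((PySem.List.enumerate (data.drop k) (k : Int)).foldl (fun st ib => stepA ib st) st).supby
      = ((PySem.List.enumerate (data.drop k) (k : Int)).foldl (fun bst ib => stepB data bst ib) bst).supby := by
  intro n
  induction n with
  | zero =>
    intro k st bst hn _ h1 h2 _ _ _
    rw [List.drop_eq_nil_of_le (by omega)]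
    exact ⟨h1, h2⟩
  | succ m ih =>
    intro k st bst hn hlen h1 h2 hgh hgl hreads
    have hk : k < data.length := by omega
    rw [List.drop_eq_getElem_cons hk, PySem.List.enumerate_cons]
    have hbk := hb data[k] (List.getElem_mem hk)
    have hstep := step_eq data mnx mxx mny mxy hx0 hx1 hy0 hy1 k hk
      hbk.2.2.1 hbk.2.2.2.1 hbk.2.2.2.2.1 hbk.2.2.2.2.2 st bst hlen h1 h2 hgh hgl hreads
    obtain ⟨s1, s2, s3, s4, s5, s6⟩ := hstep
    simp only [List.foldl_cons]
    have hcast : (k : Int) + 1 = ((k + 1 : Nat) : Int) := by push_cast; ring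
    rw [hcast] at *
    exact ih (k + 1) (stepA ((k : Int), data[k]) st) (stepB data bst ((k : Int), data[k]))
      (by omega) s3 s1 s2 s4 s5 s6

-- ---- the initial grids ----
theorem readC_init (mnx mxx mny mxy : Int) (hx0 : mnx ≤ 0) (hx1 : -1 ≤ mxx)
    (hy0 : mny ≤ 0) (hy1 : -1 ≤ mxy) (c0 d : Int) {p q : Int}
    (hp1 : mnx ≤ p) (hp2 : p ≤ mxx) (hq1 : mny ≤ q) (hq2 : q ≤ mxy) :
    readC ((PySem.List.pyRange mny (mxy + 1) 1).map (fun _ =>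
      (PySem.List.pyRange mnx (mxx + 1) 1).map (fun _ => c0))) q p d = c0 := by
  set row : List Int := (PySem.List.pyRange mnx (mxx + 1) 1).map (fun _ => c0) with hrow
  set g : List (List Int) := (PySem.List.pyRange mny (mxy + 1) 1).map (fun _ => row) with hgdef
  have hglen : g.length = (mxy + 1 - mny).toNat := by
    rw [hgdef]; simp [PySem.List.length_pyRange_one]
  have hrlen : row.length = (mxx + 1 - mnx).toNat := by
    rw [hrow]; simp [PySem.List.length_pyRange_one]
  have hk : PySem.List.pyIdx? g.length q = some (idx g.length q) :=
    pyIdx?_eq_idx (by omega) (by omega)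
  have hklt : idx g.length q < g.length := by
    rw [hglen]; exact idx_lt rfl hy0 hy1 hq1 hq2
  rw [readC_eq hk]
  have hgq : g[idx g.length q]? = some row := by
    rw [hgdef, List.getElem?_map]
    have : idx g.length q < (PySem.List.pyRange mny (mxy + 1) 1).length := by
      simpa [hgdef] using hklt
    rw [List.getElem?_eq_getElem this]
    rfl
  rw [hgq]
  simp only [Option.getD_some]
  have hplt : idx row.length p < row.length := by
    rw [hrlen]; exact idx_lt rfl hx0 hx1 hp1 hp2
  rw [pyGetD_idx (by omega) (by omega)]
  rw [hrow, List.getElem?_map]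
  have : idx row.length p < (PySem.List.pyRange mnx (mxx + 1) 1).length := by
    simpa [hrow] using hplt
  rw [List.getElem?_eq_getElem this]
  rfl

theorem dims_init (mnx mxx mny mxy : Int) (c0 : Int) :
    Dims ((PySem.List.pyRange mny (mxy + 1) 1).map (fun _ =>
      (PySem.List.pyRange mnx (mxx + 1) 1).map (fun _ => c0)))
      (mxy + 1 - mny).toNat (mxx + 1 - mnx).toNat := by
  constructor
  · simp [PySem.List.length_pyRange_one]
  · intro row hrow
    rcases List.mem_map.mp hrow with ⟨_, _, rfl⟩
    simp [PySem.List.length_pyRange_one]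

-- ===== VERDICT (by name: the statement is the Claim_ definition above) =====
theorem brick_fall_spec : Claim_equal_brick_fall := by
  unfold Claim_equal_brick_fall
  intro data _ hpre
  unfold Spec_brick_fall
  obtain ⟨hne, hord, hx0, hx1, hy0, hy1⟩ := hpre
  unfold brick_fall brick_fall_alt
  have hbnd : ∀ b ∈ data, b.1.1 ≤ b.2.1 ∧ b.1.2.1 ≤ b.2.2.1 ∧
      gMinX data ≤ b.1.1 ∧ b.2.1 ≤ gMaxX data ∧ gMinY data ≤ b.1.2.1 ∧ b.2.2.1 ≤ gMaxY data := by
    intro b hbmem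
    have h1 := gMinX_le hbmem
    have h2 := le_gMaxX hbmem
    have h3 := gMinY_le hbmem
    have h4 := le_gMaxY hbmem
    have h5 := hord b hbmem
    refine ⟨h5.1, h5.2, by omega, by omega, by omega, by omega⟩
  have hmain := main_fold data (gMinX data) (gMaxX data) (gMinY data) (gMaxY data)
    hx0 hx1 hy0 hy1 hbnd data.length 0
    ⟨(PySem.List.pyRange (gMinY data) (gMaxY data + 1) 1).map (fun _ =>
        (PySem.List.pyRange (gMinX data) (gMaxX data + 1) 1).map (fun _ => (0 : Int))),
      (PySem.List.pyRange (gMinY data) (gMaxY data + 1) 1).map (fun _ =>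
        (PySem.List.pyRange (gMinX data) (gMaxX data + 1) 1).map (fun _ => (-1 : Int))),
      supInit (data.length : Int), supInit (data.length : Int)⟩
    ⟨[], supInit (data.length : Int), supInit (data.length : Int)⟩
    (by omega) rfl rfl rfl (dims_init _ _ _ _ _) (dims_init _ _ _ _ _) ?_
  · rw [List.drop_zero] at hmain
    have h0 : ((0 : Nat) : Int) = 0 := rfl
    rw [h0] at hmain
    exact Prod.ext (congrArg PySem.Dict.items hmain.1) (congrArg PySem.Dict.items hmain.2)
  · intro p q hp1 hp2 hq1 hq2
    show readC _ q p 0 = (belowB data [] ((0 : Nat) : Int) p q).1 ∧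
      readC _ q p (-1) = (belowB data [] ((0 : Nat) : Int) p q).2
    rw [show (((0 : Nat) : Int)) = (0 : Int) from rfl, belowB_zero]
    constructor
    · exact readC_init _ _ _ _ hx0 hx1 hy0 hy1 _ _ hp1 hp2 hq1 hq2
    · exact readC_init _ _ _ _ hx0 hx1 hy0 hy1 _ _ hp1 hp2 hq1 hq2
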